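-- pv_equiv track=rewrite | github.com/YunfeiZHAO/algorithms | src/bit.py | generate_super_string
-- ===== SOURCE A (Python) =====
-- def generate_super_string(s):
--     """Generate all possible super strings."""
--     zeros_indices = [i for i, bit in enumerate(s) if bit == '0']
--     num_zeros = len(zeros_indices)
--     super_strings = []
--
--     for i in range(1 << num_zeros):  # Iterate over all combinations
--         temp_bit_list = list(s)
--         for j, zero_index in enumerate(zeros_indices):
--             if i & (1 << j):  # Check if the j-th bit of i is set
--                 temp_bit_list[zero_index] = '1'
--         super_strings.append("".join(temp_bit_list))
--     return super_strings
-- ===== SOURCE B (Python) =====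
-- def generate_super_string(s):
--     """Generate all possible super strings (incremental doubling over zero positions)."""
--     result = [s]
--     for idx, ch in enumerate(s):
--         if ch == '0':
--             result = result + [r[:idx] + '1' + r[idx + 1:] for r in result]
--     return result
-- ===== Notes on version B (the rewrite author's own statement) =====
-- stated objective: alternative
-- what changed: B builds the result list by incremental doubling (for each zero position, append a copy of every string so far with that position flipped to '1') instead of A's per-combination rebuild of the whole string from a bitmask over all 2^k subsets.
import Mathlib
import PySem

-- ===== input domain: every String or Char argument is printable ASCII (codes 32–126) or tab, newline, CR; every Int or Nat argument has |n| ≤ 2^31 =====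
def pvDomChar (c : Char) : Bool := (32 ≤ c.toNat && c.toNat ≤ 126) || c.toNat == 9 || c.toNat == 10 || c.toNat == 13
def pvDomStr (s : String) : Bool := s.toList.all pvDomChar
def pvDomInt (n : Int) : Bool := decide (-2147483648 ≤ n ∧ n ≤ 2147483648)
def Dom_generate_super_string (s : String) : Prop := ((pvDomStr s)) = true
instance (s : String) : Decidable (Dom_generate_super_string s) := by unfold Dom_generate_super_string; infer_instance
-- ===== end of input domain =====

-- B rebuilds the result by incremental doubling over the zero positions instead of A's
-- per-combination bitmask reconstruction (objective: alternative decomposition, same output order).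

-- ===== PORT A =====
-- A's inner loop: set zeros_indices[j] to '1' whenever bit j of i is set
def pvApplyMask (i : Nat) (zs : List Nat) (t : List Char) : List Char :=
  zs.zipIdx.foldl (fun tl p => if i &&& (1 <<< p.2) != 0 then tl.set p.1 '1' else tl) t

def generate_super_string (s : String) : List String :=
  let zeros_indices := ((s.toList.zipIdx).filter (fun p => p.1 == '0')).map (·.2)
  let num_zeros := zeros_indices.length
  let super_strings : List String := []
  (List.range (1 <<< num_zeros)).foldl
    (fun acc i => acc ++ [String.ofList (pvApplyMask i zeros_indices s.toList)]) super_strings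

-- ===== PORT B =====
-- r[:idx] + '1' + r[idx+1:]
def pvFlip (r : String) (idx : Nat) : String :=
  String.ofList (r.toList.take idx ++ '1' :: r.toList.drop (idx + 1))

def generate_super_string_alt (s : String) : List String :=
  (s.toList.zipIdx).foldl
    (fun result p =>
      if p.1 == '0' then result ++ result.map (fun r => pvFlip r p.2) else result) [s]

-- ===== PRECONDITION & SPEC =====
def Spec_generate_super_string (s : String) (out : List String) : Prop := out = generate_super_string_alt s
instance (s : String) (out : List String) : Decidable (Spec_generate_super_string s out) := by unfold Spec_generate_super_string; infer_instance

-- ===== CLAIM (what is proved, stated in full; the proofs are below) =====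
def Claim_equal_generate_super_string : Prop := ∀ (s : String), Dom_generate_super_string s → Spec_generate_super_string s (generate_super_string s)

-- ===== LEMMAS AND PROOFS =====

-- char-level flip: what pvFlip does to the underlying list
def pvCharFlip (l : List Char) (z : Nat) : List Char := l.take z ++ '1' :: l.drop (z + 1)

lemma pvCharFlip_eq_set (l : List Char) (z : Nat) (h : z < l.length) :
    pvCharFlip l z = l.set z '1' := by
  rw [pvCharFlip, List.set_eq_take_append_cons_drop]; simp [h]

lemma pvApplyMask_length (i : Nat) (zs : List Nat) (t : List Char) :
    (pvApplyMask i zs t).length = t.length := by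
  unfold pvApplyMask
  generalize zs.zipIdx = l
  induction l generalizing t with
  | nil => rfl
  | cons p l ih =>
    simp only [List.foldl_cons]
    split <;> [rw [ih, List.length_set]; rw [ih]]

lemma pvCond_eq_testBit (i j : Nat) : (i &&& (1 <<< j) != 0) = i.testBit j := by
  rw [Nat.one_shiftLeft, Nat.and_two_pow]
  cases h : i.testBit j
  · simp
  · simp

-- B's guarded fold over zipIdx equals the plain fold over the filtered indices
lemma pvFoldl_filter {α γ : Type} (f : γ → Nat → γ) (c : α × Nat → Bool)
    (l : List (α × Nat)) (init : γ) :
    l.foldl (fun a p => if c p then f a p.2 else a) init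
      = ((l.filter c).map (·.2)).foldl f init := by
  induction l generalizing init with
  | nil => rfl
  | cons p l ih =>
    by_cases h : c p <;> simp [h, ih]

-- A's append-accumulating fold is a map
lemma pvFoldl_append_map {α β : Type} (f : α → β) (l : List α) (acc : List β) :
    l.foldl (fun a i => a ++ [f i]) acc = acc ++ l.map f := by
  induction l generalizing acc with
  | nil => simp
  | cons x l ih => simp [ih]

lemma pvApplyMask_snoc (i : Nat) (zs : List Nat) (z : Nat) (t : List Char) :
    pvApplyMask i (zs ++ [z]) t
      = (if i &&& (1 <<< zs.length) != 0 then (pvApplyMask i zs t).set z '1'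
         else pvApplyMask i zs t) := by
  unfold pvApplyMask
  rw [List.zipIdx_append, List.foldl_append]
  simp

lemma pvApplyMask_high_irrelevant (i : Nat) (zs : List Nat) (t : List Char) (n : Nat)
    (hn : zs.length ≤ n) :
    pvApplyMask (2 ^ n + i) zs t = pvApplyMask i zs t := by
  unfold pvApplyMask
  apply PySem.List.foldl_congr_mem
  intro acc p hp
  have hlt : p.2 < n := by
    have := List.snd_lt_of_mem_zipIdx hp
    omega
  rw [pvCond_eq_testBit, pvCond_eq_testBit, Nat.testBit_two_pow_add_gt hlt]

-- main lemma: doubling over zs enumerates exactly A's bitmask family, in A's order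
lemma pvMain (t : List Char) (zs : List Nat) (h : ∀ z ∈ zs, z < t.length) :
    zs.foldl (fun res z => res ++ res.map (fun l => pvCharFlip l z)) [t]
      = (List.range (2 ^ zs.length)).map (fun i => pvApplyMask i zs t) := by
  induction zs using List.reverseRecOn with
  | nil => simp [pvApplyMask]
  | append_singleton zs z ih =>
    have hz : z < t.length := h z (by simp)
    have h' : ∀ w ∈ zs, w < t.length := fun w hw => h w (by simp [hw])
    rw [List.foldl_append, ih h', List.foldl_cons, List.foldl_nil]
    have hlen : 2 ^ (zs ++ [z]).length = 2 ^ zs.length + 2 ^ zs.length := by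
      simp [List.length_append, pow_succ]; ring
    rw [hlen, List.range_add, List.map_append, List.map_map, List.map_map]
    congr 1
    · -- unflipped half: bit zs.length is clear on i < 2^n
      apply List.map_congr_left
      intro i hi
      have hi' : i < 2 ^ zs.length := List.mem_range.mp hi
      rw [pvApplyMask_snoc, pvCond_eq_testBit, Nat.testBit_lt_two_pow hi']
      simp
    · -- flipped half: bit zs.length is set on 2^n + i
      apply List.map_congr_left
      intro i hi
      have hi' : i < 2 ^ zs.length := List.mem_range.mp hi
      have hbit : (2 ^ zs.length + i).testBit zs.length = true := by
        rw [Nat.testBit_two_pow_add_eq, Nat.testBit_lt_two_pow hi']; rfl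
      simp only [Function.comp_apply]
      rw [pvApplyMask_snoc, pvCond_eq_testBit, hbit,
        pvApplyMask_high_irrelevant i zs t zs.length le_rfl,
        pvCharFlip_eq_set _ _ (by rw [pvApplyMask_length]; exact hz)]
      simp

-- lift the char-level doubling fold to B's String-level fold
lemma pvLift (zs : List Nat) (rs : List (List Char)) :
    zs.foldl (fun res z => res ++ res.map (fun r => pvFlip r z)) (rs.map String.ofList)
      = (zs.foldl (fun res z => res ++ res.map (fun l => pvCharFlip l z)) rs).map String.ofList := by
  induction zs generalizing rs with
  | nil => rfl
  | cons z zs ih =>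
    simp only [List.foldl_cons]
    rw [← ih (rs ++ rs.map (fun l => pvCharFlip l z))]
    congr 1
    simp [List.map_map, pvFlip, pvCharFlip, Function.comp_def]

lemma pvZeros_lt (s : String) :
    ∀ z ∈ ((s.toList.zipIdx).filter (fun p => p.1 == '0')).map (·.2), z < s.toList.length := by
  intro z hz
  obtain ⟨p, hp, rfl⟩ := List.mem_map.mp hz
  have hp' : p ∈ s.toList.zipIdx := List.mem_of_mem_filter hp
  have := List.snd_lt_of_mem_zipIdx hp'
  omega

-- ===== VERDICT (by name: the statement is the Claim_ definition above) =====
theorem generate_super_string_spec : Claim_equal_generate_super_string := by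
  intro s _
  unfold Spec_generate_super_string generate_super_string generate_super_string_alt
  simp only
  set zs := ((s.toList.zipIdx).filter (fun p => p.1 == '0')).map (·.2) with hzs
  rw [pvFoldl_append_map, List.nil_append, Nat.one_shiftLeft,
    pvFoldl_filter (fun result z => result ++ result.map (fun r => pvFlip r z))
      (fun p => p.1 == '0') s.toList.zipIdx [s], ← hzs]
  have : ([s] : List String) = ([s.toList] : List (List Char)).map String.ofList := by
    simp [String.ofList_toList]
  rw [this, pvLift zs [s.toList], pvMain s.toList zs (pvZeros_lt s), List.map_map]
  rfl
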